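-- pv_equiv track=rewrite | github.com/Lyncs-API/lyncs | lyncs/utils/class_utils.py | get_parameters_doc
-- ===== SOURCE A (Python) =====
-- def get_parameters_doc(doc):
--     """
--     Extracts the documentation of the parameters
--     """
--     found = False
--     parameters = []
--     for line in doc.split("\n"):
--         words = line.split()
--         if not found and len(words) == 1 and words[0].startswith("Parameter"):
--             found = True
--         elif found and words:
--             parameters.append(line)
--         elif found and not words:
--             break
--
--     if found and parameters:
--         return "\n".join(parameters[1:])
--     return doc
-- ===== SOURCE B (Python) =====
-- def _split_runs(lines):
--     """Group lines into maximal runs (paragraphs) of consecutive non-blank lines."""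
--     runs = []
--     cur = []
--     for line in lines:
--         if line.split():
--             cur.append(line)
--         else:
--             if cur:
--                 runs.append(cur)
--             cur = []
--     if cur:
--         runs.append(cur)
--     return runs
--
--
-- def _find_tail(run):
--     """The part of the run after its first one-word 'Parameter*' header, or None."""
--     while run:
--         head, run = run[0], run[1:]
--         words = head.split()
--         if len(words) == 1 and words[0].startswith("Parameter"):
--             return run
--     return None
--
--
-- def get_parameters_doc(doc):
--     """
--     Extracts the documentation of the parameters
--     """
--     for run in _split_runs(doc.split("\n")):
--         tail = _find_tail(run)
--         if tail is not None:
--             if tail: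
--                 return "\n".join(tail[1:])
--             return doc
--     return doc
-- ===== Notes on version B (the rewrite author's own statement) =====
-- stated objective: alternative
-- what changed: B first groups the lines into paragraph blocks (maximal runs of non-blank lines), then searches the blocks for the first one containing a one-word header line and takes that block's remainder after the header, instead of A's flag-driven state machine over individual lines.
import Mathlib
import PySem

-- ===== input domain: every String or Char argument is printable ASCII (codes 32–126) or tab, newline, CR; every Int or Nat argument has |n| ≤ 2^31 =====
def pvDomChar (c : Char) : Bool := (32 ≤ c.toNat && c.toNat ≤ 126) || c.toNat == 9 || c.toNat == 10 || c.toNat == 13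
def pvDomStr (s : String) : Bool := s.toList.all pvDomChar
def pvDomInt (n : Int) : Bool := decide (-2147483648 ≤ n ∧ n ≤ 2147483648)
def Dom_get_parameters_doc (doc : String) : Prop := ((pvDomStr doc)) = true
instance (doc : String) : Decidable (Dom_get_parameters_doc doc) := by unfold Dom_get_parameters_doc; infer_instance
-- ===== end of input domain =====

-- B groups the lines into paragraph blocks (maximal runs of non-blank lines) and searches the
-- blocks for the header, instead of A's flag-driven per-line state machine (objective: alternative).

-- ===== PORT A =====
-- A's single for-loop with state (found, parameters); returning at the 'break'.
def pvALoop : List String → Bool → List String → Bool × List String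
  | [], found, params => (found, params)
  | line :: rest, found, params =>
    let words := PySem.Str.split₀ line
    if !found && words.length == 1 && PySem.Str.startswith (words.headD "") "Parameter" then
      pvALoop rest true params
    else if found && !words.isEmpty then
      pvALoop rest found (params ++ [line])
    else if found && words.isEmpty then
      (found, params)      -- break
    else
      pvALoop rest found params

def get_parameters_doc (doc : String) : String :=
  let r := pvALoop ((PySem.Str.split? doc "\n").getD []) false []
  if r.1 && !r.2.isEmpty then PySem.Str.join "\n" (PySem.List.slice r.2 (some 1) none)
  else doc

-- ===== PORT B =====
-- _split_runs: group lines into maximal runs of consecutive non-blank lines (accumulators runs, cur).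
def pvSplitRuns : List String → List (List String) → List String → List (List String)
  | [], runs, cur => if cur.isEmpty then runs else runs ++ [cur]
  | line :: rest, runs, cur =>
    if !(PySem.Str.split₀ line).isEmpty then pvSplitRuns rest runs (cur ++ [line])
    else if cur.isEmpty then pvSplitRuns rest runs []
    else pvSplitRuns rest (runs ++ [cur]) []

-- _find_tail: the part of the run after its first one-word 'Parameter*' header, or none.
def pvFindTail : List String → Option (List String)
  | [] => none
  | head :: run =>
    let words := PySem.Str.split₀ head
    if words.length == 1 && PySem.Str.startswith (words.headD "") "Parameter" then some run
    else pvFindTail run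

-- the for-runs loop of get_parameters_doc in Source B
def pvBMain : List (List String) → String → String
  | [], doc => doc
  | run :: rest, doc =>
    match pvFindTail run with
    | some tail =>
      if !tail.isEmpty then PySem.Str.join "\n" (PySem.List.slice tail (some 1) none)
      else doc
    | none => pvBMain rest doc

def get_parameters_doc_alt (doc : String) : String :=
  pvBMain (pvSplitRuns ((PySem.Str.split? doc "\n").getD []) [] []) doc

-- ===== PRECONDITION & SPEC =====
def Spec_get_parameters_doc (doc : String) (out : String) : Prop := out = get_parameters_doc_alt doc
instance (doc : String) (out : String) : Decidable (Spec_get_parameters_doc doc out) := by unfold Spec_get_parameters_doc; infer_instance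

-- ===== CLAIM (what is proved, stated in full; the proofs are below) =====
def Claim_equal_get_parameters_doc : Prop := ∀ (doc : String), Dom_get_parameters_doc doc → Spec_get_parameters_doc doc (get_parameters_doc doc)

-- ===== LEMMAS AND PROOFS =====

-- A's collection phase after the header is found (proof-only helper).
def pvBCollect : List String → List String → List String
  | [], acc => acc
  | line :: rest, acc =>
    if (PySem.Str.split₀ line).isEmpty then acc      -- break
    else pvBCollect rest (acc ++ [line])

theorem pvALoop_found (ls : List String) : ∀ params, pvALoop ls true params = (true, pvBCollect ls params) := by
  induction ls with
  | nil => intro params; rfl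
  | cons line rest ih =>
    intro params
    simp only [pvALoop, pvBCollect]
    by_cases h : (PySem.Str.split₀ line).isEmpty
    · simp [List.isEmpty_iff.mp h]
    · have hne : PySem.Str.split₀ line ≠ [] := fun hn => h (List.isEmpty_iff.mpr hn)
      simp [h, ih]

theorem pvBCollect_acc (ls : List String) : ∀ acc, pvBCollect ls acc = acc ++ pvBCollect ls [] := by
  induction ls with
  | nil => intro acc; simp [pvBCollect]
  | cons line rest ih =>
    intro acc
    simp only [pvBCollect]
    split
    · simp
    · rw [ih (acc ++ [line]), ih ([] ++ [line])]; simp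

theorem pvFindTail_append_none {xs : List String} (ys : List String) (h : pvFindTail xs = none) :
    pvFindTail (xs ++ ys) = pvFindTail ys := by
  induction xs with
  | nil => simp
  | cons a xs ih =>
    simp only [List.cons_append, pvFindTail] at h ⊢
    by_cases hc : ((PySem.Str.split₀ a).length == 1 &&
        PySem.Str.startswith ((PySem.Str.split₀ a).headD "") "Parameter") = true
    · rw [if_pos hc] at h; exact absurd h (by simp)
    · rw [if_neg hc] at h ⊢; exact ih h

theorem pvFindTail_append_some {xs : List String} {t : List String} (ys : List String)
    (h : pvFindTail xs = some t) : pvFindTail (xs ++ ys) = some (t ++ ys) := by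
  induction xs with
  | nil => simp [pvFindTail] at h
  | cons a xs ih =>
    simp only [List.cons_append, pvFindTail] at h ⊢
    by_cases hc : ((PySem.Str.split₀ a).length == 1 &&
        PySem.Str.startswith ((PySem.Str.split₀ a).headD "") "Parameter") = true
    · rw [if_pos hc] at h ⊢; cases h; rfl
    · rw [if_neg hc] at h ⊢; exact ih h

theorem pvSplitRuns_runs_acc (ls : List String) :
    ∀ runs cur, pvSplitRuns ls runs cur = runs ++ pvSplitRuns ls [] cur := by
  induction ls with
  | nil => intro runs cur; simp only [pvSplitRuns]; split <;> simp
  | cons line rest ih =>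
    intro runs cur
    simp only [pvSplitRuns]
    split
    · rw [ih runs (cur ++ [line])]
    · split
      · rw [ih runs []]
      · rw [ih (runs ++ [cur]) [], ih ([] ++ [cur]) []]; simp

theorem pvBMain_append_none (runs : List (List String)) (X : List (List String)) (doc : String)
    (h : ∀ r ∈ runs, pvFindTail r = none) : pvBMain (runs ++ X) doc = pvBMain X doc := by
  induction runs with
  | nil => rfl
  | cons r rs ih =>
    have hr : pvFindTail r = none := h r (by simp)
    simp only [List.cons_append, pvBMain, hr]
    exact ih (fun x hx => h x (by simp [hx]))

-- FOUND phase: once the current run 'cur' already contains the header (tail after it inside cur),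
-- B's remaining computation collects exactly A's post-header lines.
theorem pvFound (doc : String) (rest : List String) :
    ∀ runs cur tail, (∀ r ∈ runs, pvFindTail r = none) → pvFindTail cur = some tail →
    pvBMain (pvSplitRuns rest runs cur) doc =
      (let c := tail ++ pvBCollect rest [];
       if !c.isEmpty then PySem.Str.join "\n" (PySem.List.slice c (some 1) none) else doc) := by
  induction rest with
  | nil =>
    intro runs cur tail hruns hcur
    have hcne : cur.isEmpty = false := by
      cases cur with
      | nil => simp [pvFindTail] at hcur
      | cons a l => rfl
    simp only [pvSplitRuns, hcne, Bool.false_eq_true, if_false]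
    rw [pvBMain_append_none runs [cur] doc hruns]
    simp [pvBMain, hcur, pvBCollect]
  | cons line rest ih =>
    intro runs cur tail hruns hcur
    simp only [pvSplitRuns]
    by_cases hb : (PySem.Str.split₀ line).isEmpty
    · have hcne : cur.isEmpty = false := by
        cases cur with
        | nil => simp [pvFindTail] at hcur
        | cons a l => rfl
      simp only [hb, Bool.not_true, Bool.false_eq_true, if_false, hcne]
      rw [pvSplitRuns_runs_acc rest (runs ++ [cur]) [], List.append_assoc,
        pvBMain_append_none runs ([cur] ++ pvSplitRuns rest [] []) doc hruns]
      simp [pvBMain, hcur, pvBCollect, hb]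
    · simp only [hb, Bool.not_false, if_true]
      rw [ih runs (cur ++ [line]) (tail ++ [line]) hruns (pvFindTail_append_some [line] hcur)]
      simp only [pvBCollect, hb, Bool.false_eq_true, if_false]
      rw [pvBCollect_acc rest ([] ++ [line])]
      simp
-- UNFOUND phase: header not yet seen (neither in finished runs nor in cur); relate B to A's loop.
theorem pvUnfound (doc : String) (lines : List String) :
    ∀ runs cur, (∀ r ∈ runs, pvFindTail r = none) → pvFindTail cur = none →
    pvBMain (pvSplitRuns lines runs cur) doc =
      (let r := pvALoop lines false [];
       if r.1 && !r.2.isEmpty then PySem.Str.join "\n" (PySem.List.slice r.2 (some 1) none) else doc) := by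
  induction lines with
  | nil =>
    intro runs cur hruns hcur
    simp only [pvSplitRuns, pvALoop]
    split
    · have h0 := pvBMain_append_none runs [] doc hruns
      simp only [List.append_nil] at h0
      rw [h0]; rfl
    · rw [pvBMain_append_none runs [cur] doc hruns]; simp [pvBMain, hcur]
  | cons line rest ih =>
    intro runs cur hruns hcur
    by_cases hb : (PySem.Str.split₀ line).isEmpty
    · have hnh : ¬((PySem.Str.split₀ line).length == 1 &&
          PySem.Str.startswith ((PySem.Str.split₀ line).headD "") "Parameter") = true := by
        rw [List.isEmpty_iff.mp hb]; simp
      have hA : pvALoop (line :: rest) false [] = pvALoop rest false [] := by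
        simp only [pvALoop]
        rw [if_neg (by simpa using hnh), if_neg (by simp), if_neg (by simp)]
      rw [hA]
      have hB : pvSplitRuns (line :: rest) runs cur =
          (if cur.isEmpty then pvSplitRuns rest runs [] else pvSplitRuns rest (runs ++ [cur]) []) := by
        simp only [pvSplitRuns, hb]; rfl
      rw [hB]
      by_cases hc : cur.isEmpty
      · rw [if_pos hc]; exact ih runs [] hruns rfl
      · rw [if_neg hc]
        refine ih (runs ++ [cur]) [] ?_ rfl
        intro r hr
        rcases List.mem_append.mp hr with h | h
        · exact hruns r h
        · simp at h; subst h
          cases hcc : pvFindTail r with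
          | none => rfl
          | some t => rw [hcc] at hcur; exact absurd hcur (by simp)
    · have hB : pvSplitRuns (line :: rest) runs cur = pvSplitRuns rest runs (cur ++ [line]) := by
        simp only [pvSplitRuns, hb]; rfl
      rw [hB]
      by_cases hh : ((PySem.Str.split₀ line).length == 1 &&
          PySem.Str.startswith ((PySem.Str.split₀ line).headD "") "Parameter") = true
      · -- header line
        have hA : pvALoop (line :: rest) false [] = (true, pvBCollect rest []) := by
          simp only [pvALoop]
          rw [if_pos (by simpa using hh)]
          exact pvALoop_found rest []
        rw [hA]
        have hft : pvFindTail (cur ++ [line]) = some [] := by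
          rw [pvFindTail_append_none [line] hcur]
          simp only [pvFindTail]
          rw [if_pos hh]
        rw [pvFound doc rest runs (cur ++ [line]) [] hruns hft]
        simp
      · -- ordinary non-blank line
        have hA : pvALoop (line :: rest) false [] = pvALoop rest false [] := by
          simp only [pvALoop]
          rw [if_neg (by simpa using hh), if_neg (by simp), if_neg (by simp)]
        rw [hA]
        refine ih runs (cur ++ [line]) hruns ?_
        rw [pvFindTail_append_none [line] hcur]
        simp only [pvFindTail]
        rw [if_neg hh]

-- ===== VERDICT (by name: the statement is the Claim_ definition above) =====
theorem get_parameters_doc_spec : Claim_equal_get_parameters_doc := by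
  intro doc _
  show get_parameters_doc doc = get_parameters_doc_alt doc
  simp only [get_parameters_doc, get_parameters_doc_alt]
  rw [pvUnfound doc ((PySem.Str.split? doc "\n").getD []) [] [] (by simp) rfl]
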